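-- pv_equiv track=rewrite | github.com/PedroKeita/Bolsa-Python | ex06.py | numeros_sortudos
-- ===== SOURCE A (Python) =====
-- def numeros_sortudos(limite_inferior=1, limite_superior=100000):
--     ''' Daniela é uma pessoa muito supersticiosa. Para ela, um número é
--     sortudo se ele contém o dígito 2 mas não o dígito 7.
--     Faça então uma função que informe a ela quantos números sortudos
--     existem entre um intervalo dado, incluindo os extremos.
--     Por exemplo: entre 18644 e 33087, existem 7995 números sortudos.
--     Dica: faça uma função de validação e outra que a chama e
--     verifica o intervalo dado
--     '''
--
--     def intervalo(limite_inferior, limite_superior):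
--         num_sortido = 0
--         for num_intervalo in range(limite_inferior, limite_superior + 1):
--             if "2" in str(num_intervalo) and "7" not in str(num_intervalo):
--                 num_sortido += 1
--         return num_sortido
--
--     return intervalo(limite_inferior, limite_superior)
-- ===== SOURCE B (Python) =====
-- def numeros_sortudos(limite_inferior=1, limite_superior=100000):
--     # Digit-DP closed form: O(number of digits) instead of scanning the whole range.
--
--     def _avoid(m, banned):
--         # do all decimal digits of m avoid `banned`?
--         while m:
--             if m % 10 in banned:
--                 return False
--             m //= 10
--         return True
--
--     def _ca(m, banned):
--         # count of x in [0, m] (m >= 0) whose digits all avoid `banned`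
--         if m < 10:
--             return sum(1 for d in range(m + 1) if d not in banned)
--         q, r = divmod(m, 10)
--         low = sum(1 for d in range(r + 1) if d not in banned)
--         full = _ca(q - 1, banned) * (10 - len(banned))
--         return full + (low if _avoid(q, banned) else 0)
--
--     def count_avoid(n, banned):
--         if n < 0:
--             return 0
--         return _ca(n, banned)
--
--     def lucky_upto(n):
--         # lucky numbers (contain 2, no 7) in [0, n]
--         return count_avoid(n, (7,)) - count_avoid(n, (2, 7))
--
--     total = 0
--     a, b = max(limite_inferior, 0), limite_superior
--     if a <= b:
--         total += lucky_upto(b) - lucky_upto(a - 1)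
--     a, b = max(-limite_superior, 1), -limite_inferior
--     if a <= b:
--         total += lucky_upto(b) - lucky_upto(a - 1)
--     return total
-- ===== Notes on version B (the rewrite author's own statement) =====
-- stated objective: faster
-- what changed: Replaces A's scan of every integer in [lo, hi] (string-converting each) by a digit-DP closed form: count-of-digit-avoiders prefix function evaluated as F(hi)-F(lo-1), with the negative half of the interval handled by mirroring.
import Mathlib
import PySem

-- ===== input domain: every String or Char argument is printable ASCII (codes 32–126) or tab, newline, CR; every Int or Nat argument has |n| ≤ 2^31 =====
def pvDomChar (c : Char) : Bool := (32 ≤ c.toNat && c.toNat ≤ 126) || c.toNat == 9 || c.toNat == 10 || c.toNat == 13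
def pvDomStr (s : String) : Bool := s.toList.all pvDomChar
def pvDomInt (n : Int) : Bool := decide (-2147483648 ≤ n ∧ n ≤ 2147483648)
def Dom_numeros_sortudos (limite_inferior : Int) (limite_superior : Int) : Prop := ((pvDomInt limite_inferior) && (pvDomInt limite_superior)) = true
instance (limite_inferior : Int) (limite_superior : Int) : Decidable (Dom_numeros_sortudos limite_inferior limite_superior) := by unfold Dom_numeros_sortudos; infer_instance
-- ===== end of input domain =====

-- B replaces A's scan of every number in the interval by a digit-DP prefix count
-- F(hi) - F(lo-1), split into the negative and nonnegative halves of the interval.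

-- ===== PORT A =====
-- literal port of A: loop over range(lo, hi+1), test '"2" in str(n) and "7" not in str(n)'
def numeros_sortudos (limite_inferior : Int) (limite_superior : Int) : Int :=
  (PySem.List.pyRange limite_inferior (limite_superior + 1) 1).foldl
    (fun acc n =>
      if PySem.Str.isIn "2" (PySem.Int.toStr n) && !PySem.Str.isIn "7" (PySem.Int.toStr n)
      then acc + 1 else acc) 0

-- ===== PORT B =====
-- _avoid(m, banned): do all decimal digits of m avoid `banned`?
def pvAvoid (banned : List Nat) (m : Nat) : Bool :=
  if m = 0 then true
  else (decide (m % 10 ∉ banned)) && pvAvoid banned (m / 10)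
  decreasing_by exact Nat.div_lt_self (Nat.pos_of_ne_zero (by assumption)) (by norm_num)

-- sum(1 for d in range(r+1) if d not in banned)
def pvAllowedUpto (banned : List Nat) (r : Nat) : Int :=
  ((List.range (r + 1)).countP (fun d => decide (d ∉ banned)) : Int)

-- _ca(m, banned): count of x in [0, m] whose digits all avoid `banned` (m ≥ 0)
def pvCA (banned : List Nat) (m : Nat) : Int :=
  if m < 10 then pvAllowedUpto banned m
  else
    pvCA banned (m / 10 - 1) * (10 - (banned.length : Int)) +
      (if pvAvoid banned (m / 10) then pvAllowedUpto banned (m % 10) else 0)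
  decreasing_by
    have h1 : m / 10 < m := Nat.div_lt_self (by omega) (by norm_num)
    omega

-- count_avoid(n, banned)
def pvCountAvoid (banned : List Nat) (n : Int) : Int :=
  if n < 0 then 0 else pvCA banned n.toNat

-- lucky_upto(n)
def pvLuckyUpto (n : Int) : Int := pvCountAvoid [7] n - pvCountAvoid [2, 7] n

def numeros_sortudos_alt (limite_inferior : Int) (limite_superior : Int) : Int :=
  let t1 :=
    if max limite_inferior 0 ≤ limite_superior then
      pvLuckyUpto limite_superior - pvLuckyUpto (max limite_inferior 0 - 1)
    else 0
  let t2 :=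
    if max (-limite_superior) 1 ≤ -limite_inferior then
      pvLuckyUpto (-limite_inferior) - pvLuckyUpto (max (-limite_superior) 1 - 1)
    else 0
  t1 + t2

-- ===== PRECONDITION & SPEC =====
def Spec_numeros_sortudos (limite_inferior : Int) (limite_superior : Int) (out : Int) : Prop := out = numeros_sortudos_alt limite_inferior limite_superior
instance (limite_inferior : Int) (limite_superior : Int) (out : Int) : Decidable (Spec_numeros_sortudos limite_inferior limite_superior out) := by unfold Spec_numeros_sortudos; infer_instance

-- ===== CLAIM (what is proved, stated in full; the proofs are below) =====
def Claim_equal_numeros_sortudos : Prop := ∀ (limite_inferior : Int) (limite_superior : Int), Dom_numeros_sortudos limite_inferior limite_superior → Spec_numeros_sortudos limite_inferior limite_superior (numeros_sortudos limite_inferior limite_superior)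

-- ===== LEMMAS AND PROOFS =====

-- the digit-membership predicate both programs are reduced to
def pvLuckyNat (m : Nat) : Bool :=
  (decide (2 ∈ Nat.digits 10 m)) && !(decide (7 ∈ Nat.digits 10 m))

-- A's per-element test, as a predicate on Int
def pvCondA (n : Int) : Bool :=
  PySem.Str.isIn "2" (PySem.Int.toStr n) && !PySem.Str.isIn "7" (PySem.Int.toStr n)

-- lucky prefix counts
def pvCnt (m : Nat) : Int := ((List.range (m + 1)).countP pvLuckyNat : Int)
def pvCntI (x : Int) : Int := if x < 0 then 0 else pvCnt x.toNat

-- Nat.toDigitsCore unfolding and its relation to Nat.digits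
theorem pv_tdc_succ (fuel n : Nat) (ds : List Char) : Nat.toDigitsCore 10 (fuel+1) n ds =
    (if n / 10 = 0 then (n % 10).digitChar :: ds else Nat.toDigitsCore 10 fuel (n / 10) ((n % 10).digitChar :: ds)) := rfl

theorem pv_toDigitsCore_eq (fuel : Nat) : ∀ (n : Nat) (ds : List Char), 0 < n → n ≤ fuel →
    Nat.toDigitsCore 10 fuel n ds = ((Nat.digits 10 n).map Nat.digitChar).reverse ++ ds := by
  induction fuel with
  | zero => intro n ds hn hf; omega
  | succ fuel ih =>
    intro n ds hn hf
    rw [pv_tdc_succ]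
    by_cases hq : n / 10 = 0
    · have hlt : n < 10 := by omega
      rw [Nat.digits_def' (by norm_num : (1:Nat) < 10) hn]
      have h0 : Nat.digits 10 (n / 10) = [] := by rw [hq]; simp
      rw [h0]
      simp [hq]
    · have h1 : 0 < n / 10 := Nat.pos_of_ne_zero hq
      have h2 : n / 10 ≤ fuel := by
        have := Nat.div_lt_self hn (by norm_num : (1:Nat) < 10)
        omega
      simp only [hq, if_false]
      rw [ih (n / 10) _ h1 h2]
      rw [Nat.digits_def' (by norm_num : (1:Nat) < 10) hn]
      simp

theorem pv_mem_toDigits (m : Nat) (c : Char) (d : Nat) (hd : d < 10)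
    (h0 : Nat.digitChar 0 ≠ c)
    (hc : ∀ k, k < 10 → (Nat.digitChar k = c ↔ k = d)) :
    (c ∈ Nat.toDigits 10 m ↔ d ∈ Nat.digits 10 m) := by
  rcases Nat.eq_zero_or_pos m with hm | hm
  · subst hm
    constructor
    · intro h
      have h1 : Nat.toDigits 10 0 = ['0'] := rfl
      rw [h1] at h
      simp at h
      exact absurd h.symm h0
    · intro h; simp at h
  · unfold Nat.toDigits
    rw [pv_toDigitsCore_eq (m+1) m [] hm (by omega)]
    simp only [List.append_nil, List.mem_reverse, List.mem_map]
    constructor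
    · rintro ⟨k, hk, hkc⟩
      have hk10 : k < 10 := Nat.digits_lt_base (by norm_num) hk
      rwa [(hc k hk10).mp hkc] at hk
    · intro h
      exact ⟨d, h, (hc d hd).mpr rfl⟩

theorem pv_isIn_single (n : Int) (c : Char) (d : Nat) (hd : d < 10)
    (h0 : Nat.digitChar 0 ≠ c) (hm : c ≠ '-')
    (hc : ∀ k, k < 10 → (Nat.digitChar k = c ↔ k = d)) :
    PySem.Str.isIn (String.ofList [c]) (PySem.Int.toStr n) = decide (d ∈ Nat.digits 10 n.natAbs) := by
  have h1 : PySem.Str.isIn (String.ofList [c]) (PySem.Int.toStr n) = true ↔ c ∈ PySem.Int.toChars n := by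
    rw [PySem.Str.isIn_iff_infix, PySem.Int.toList_toStr, String.toList_ofList]
    exact List.singleton_infix_iff c _
  have h2 : (c ∈ PySem.Int.toChars n) ↔ d ∈ Nat.digits 10 n.natAbs := by
    unfold PySem.Int.toChars
    split
    · next hn =>
      simp only [List.mem_cons]
      rw [pv_mem_toDigits _ c d hd h0 hc]
      simp [hm]
    · next hn =>
      rw [pv_mem_toDigits _ c d hd h0 hc]
      rw [show n.toNat = n.natAbs by omega]
  have h3 := h1.trans h2
  cases hdm : decide (d ∈ Nat.digits 10 n.natAbs) with
  | true => exact h3.mpr (of_decide_eq_true hdm)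
  | false =>
    have := of_decide_eq_false hdm
    exact Bool.eq_false_iff.mpr (fun hh => this (h3.mp hh))

theorem pv_condA_eq (n : Int) : pvCondA n = pvLuckyNat n.natAbs := by
  unfold pvCondA pvLuckyNat
  rw [show ("2" : String) = String.ofList ['2'] from rfl, show ("7" : String) = String.ofList ['7'] from rfl]
  rw [pv_isIn_single n '2' 2 (by norm_num) (by decide) (by decide) (by decide)]
  rw [pv_isIn_single n '7' 7 (by norm_num) (by decide) (by decide) (by decide)]

-- pvAvoid characterised by Nat.digits
theorem pv_avoid_iff (banned : List Nat) (m : Nat) :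
    pvAvoid banned m = decide (∀ d ∈ Nat.digits 10 m, d ∉ banned) := by
  induction m using Nat.strong_induction_on with
  | _ m ih =>
    rw [pvAvoid]
    by_cases hm : m = 0
    · subst hm; simp
    · have hpos : 0 < m := Nat.pos_of_ne_zero hm
      rw [Nat.digits_def' (by norm_num : (1:Nat) < 10) hpos]
      rw [ih (m / 10) (Nat.div_lt_self hpos (by norm_num))]
      simp [hm]

theorem pv_lucky_eq_avoid (m : Nat) :
    pvLuckyNat m = (pvAvoid [7] m && !pvAvoid [2, 7] m) := by
  rw [pv_avoid_iff, pv_avoid_iff]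
  unfold pvLuckyNat
  by_cases h2 : 2 ∈ Nat.digits 10 m <;> by_cases h7 : 7 ∈ Nat.digits 10 m <;>
    simp [h2, h7]
  · exact ⟨fun x hx => by rintro rfl; tauto, ⟨2, h2, fun h => absurd h (by norm_num)⟩⟩
  · exact fun h x hx => ⟨fun he => by subst he; tauto, fun he => by subst he; tauto⟩

-- counting lemmas
theorem pv_countP_sub {α : Type} (p q : α → Bool) (l : List α)
    (h : ∀ x ∈ l, q x = true → p x = true) :
    ((l.countP fun x => p x && !q x : Nat) : Int) = (l.countP p : Int) - (l.countP q : Int) := by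
  induction l with
  | nil => simp
  | cons a t ih =>
    have ht : ∀ x ∈ t, q x = true → p x = true := fun x hx => h x (List.mem_cons_of_mem a hx)
    have ha := h a List.mem_cons_self
    simp only [List.countP_cons]
    cases hp : p a <;> cases hq : q a <;> simp_all <;> omega

theorem pv_avoid_decomp (banned : List Nat) (h0 : (0:Nat) ∉ banned) (y j : Nat) (hj : j < 10) :
    pvAvoid banned (10 * y + j) = (decide (j ∉ banned) && pvAvoid banned y) := by
  by_cases hy : y = 0
  · subst hy
    by_cases hjz : j = 0
    · subst hjz; rw [pvAvoid]; simp [h0]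
    · rw [pvAvoid]
      have hne : ¬ (10 * 0 + j = 0) := by omega
      simp only [hne, if_false]
      have h1 : (10 * 0 + j) % 10 = j := by omega
      have h2 : (10 * 0 + j) / 10 = 0 := by omega
      rw [h1, h2]
  · rw [pvAvoid]
    have hne : ¬ (10 * y + j = 0) := by omega
    simp only [hne, if_false]
    have h1 : (10 * y + j) % 10 = j := by omega
    have h2 : (10 * y + j) / 10 = y := by omega
    rw [h1, h2]

theorem pv_avoid_lt10 (banned : List Nat) (h0 : (0:Nat) ∉ banned) (d : Nat) (hd : d < 10) :
    pvAvoid banned d = decide (d ∉ banned) := by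
  have := pv_avoid_decomp banned h0 0 d hd
  rw [Nat.mul_zero, Nat.zero_add] at this
  rw [this, pvAvoid]
  simp

theorem pv_block (banned : List Nat) (h0 : (0 : Nat) ∉ banned)
    (h10 : ((List.range 10).countP (fun d => decide (d ∉ banned)) : Int) = 10 - (banned.length : Int)) :
    ∀ t : Nat, ((List.range (10 * t)).countP (pvAvoid banned) : Int)
      = ((List.range t).countP (pvAvoid banned) : Int) * (10 - (banned.length : Int)) := by
  intro t
  induction t with
  | zero => simp
  | succ t ih =>
    have hsplit : List.range (10 * (t + 1)) = List.range (10 * t) ++ (List.range 10).map (10 * t + ·) := by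
      rw [show 10 * (t + 1) = 10 * t + 10 by ring, List.range_add]
    have hblock : (List.range 10).countP (fun j => pvAvoid banned (10 * t + j))
        = if pvAvoid banned t then (List.range 10).countP (fun d => decide (d ∉ banned)) else 0 := by
      have hc : ∀ j ∈ List.range 10, pvAvoid banned (10 * t + j) = (decide (j ∉ banned) && pvAvoid banned t) := by
        intro j hj
        exact pv_avoid_decomp banned h0 t j (List.mem_range.mp hj)
      rw [List.countP_congr (fun x hx => by rw [hc x hx])]
      cases hav : pvAvoid banned t
      · simp
      · simp
    have hrsucc : (List.range (t + 1)).countP (pvAvoid banned)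
        = (List.range t).countP (pvAvoid banned) + (if pvAvoid banned t then 1 else 0) := by
      rw [List.range_succ, List.countP_append]
      cases hav : pvAvoid banned t <;> simp [hav]
    rw [hsplit, List.countP_append, List.countP_map, hrsucc]
    have hcomp : ((List.range 10).countP fun j => pvAvoid banned (10 * t + j)) = (List.range 10).countP ((pvAvoid banned) ∘ (10 * t + ·)) := rfl
    rw [← hcomp, hblock]
    cases hav : pvAvoid banned t
    · simp only [Bool.false_eq_true, if_false]
      push_cast [ih]
      ring
    · simp only [if_true]
      push_cast [ih, h10]
      ring

theorem pv_CA_correct (banned : List Nat) (h0 : (0 : Nat) ∉ banned)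
    (h10 : ((List.range 10).countP (fun d => decide (d ∉ banned)) : Int) = 10 - (banned.length : Int)) :
    ∀ m : Nat, pvCA banned m = ((List.range (m + 1)).countP (pvAvoid banned) : Int) := by
  intro m
  induction m using Nat.strong_induction_on with
  | _ m ih =>
    rw [pvCA]
    by_cases hm : m < 10
    · simp only [hm, if_true]
      unfold pvAllowedUpto
      congr 1
      apply List.countP_congr
      intro x hx
      rw [pv_avoid_lt10 banned h0 x (by have := List.mem_range.mp hx; omega)]
    · simp only [hm, if_false]
      have hq1 : 1 ≤ m / 10 := by omega
      have hqm : m / 10 - 1 < m := by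
        have := Nat.div_lt_self (show 0 < m by omega) (show (1:Nat) < 10 by norm_num)
        omega
      have hsplit : List.range (m + 1) = List.range (10 * (m / 10)) ++ (List.range (m % 10 + 1)).map (10 * (m / 10) + ·) := by
        rw [← List.range_add]
        congr 1
        omega
      have htail : (List.range (m % 10 + 1)).countP ((pvAvoid banned) ∘ (10 * (m / 10) + ·))
          = if pvAvoid banned (m / 10) then (List.range (m % 10 + 1)).countP (fun d => decide (d ∉ banned)) else 0 := by
        have hc : ∀ j ∈ List.range (m % 10 + 1), pvAvoid banned (10 * (m / 10) + j) = (decide (j ∉ banned) && pvAvoid banned (m / 10)) := by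
          intro j hj
          have hj10 : j < 10 := by have := List.mem_range.mp hj; omega
          exact pv_avoid_decomp banned h0 (m / 10) j hj10
        rw [List.countP_congr (fun x hx => by simp only [Function.comp]; rw [hc x hx])]
        cases hav : pvAvoid banned (m / 10)
        · simp
        · simp
      rw [hsplit, List.countP_append, List.countP_map]
      push_cast
      rw [htail]
      rw [ih (m / 10 - 1) hqm]
      have hq : (m / 10 - 1) + 1 = m / 10 := by omega
      rw [hq]
      have hb := pv_block banned h0 h10 (m / 10)
      rw [hb]
      cases hav : pvAvoid banned (m / 10)
      · simp [pvAllowedUpto]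
      · simp only [if_true]
        unfold pvAllowedUpto
        push_cast
        ring

theorem pv_condA_neg (n : Int) : pvCondA (-n) = pvCondA n := by
  rw [pv_condA_eq, pv_condA_eq, Int.natAbs_neg]

theorem pv_prefix (k : Nat) : ((PySem.List.pyRange 0 (k : Int) 1).countP pvCondA : Int) = ((List.range k).countP pvLuckyNat : Int) := by
  rw [PySem.List.pyRange_one, List.countP_map]
  congr 1
  apply List.countP_congr
  intro x hx
  simp only [Function.comp, zero_add]
  have h := pv_condA_eq (x : Int)
  rw [Int.natAbs_natCast] at h
  rw [show pvCondA (x:Int) = pvLuckyNat x from h]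

theorem pv_prefixI (x : Int) (hx : 0 ≤ x) : ((PySem.List.pyRange 0 x 1).countP pvCondA : Int) = pvCntI (x - 1) := by
  obtain ⟨k, rfl⟩ := Int.eq_ofNat_of_zero_le hx
  rw [pv_prefix k]
  unfold pvCntI
  cases k with
  | zero => simp
  | succ k =>
    have h1 : ¬ ((k+1 : Nat) : Int) - 1 < 0 := by omega
    rw [if_neg h1]
    unfold pvCnt
    have h2 : ((((k:Nat)+1 : Nat) : Int) - 1).toNat = k := by omega
    rw [h2]

theorem pv_count_range_nonneg (a b : Int) (ha : 0 ≤ a) (hab : a ≤ b + 1) :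
    (((PySem.List.pyRange a (b + 1) 1).countP pvCondA : Nat) : Int) = pvCntI b - pvCntI (a - 1) := by
  have hsplit := PySem.List.pyRange_one_append 0 a (b + 1) ha hab
  have hsum : ((PySem.List.pyRange 0 (b+1) 1).countP pvCondA : Int)
      = ((PySem.List.pyRange 0 a 1).countP pvCondA : Int) + ((PySem.List.pyRange a (b+1) 1).countP pvCondA : Int) := by
    rw [hsplit, List.countP_append]
    push_cast
    ring
  rw [pv_prefixI (b+1) (by omega), pv_prefixI a ha] at hsum
  simp only [add_sub_cancel_right] at hsum
  omega

theorem pv_mirror_list (a b : Int) :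
    (PySem.List.pyRange (1 - b) (1 - a) 1).map Neg.neg = (PySem.List.pyRange a b 1).reverse := by
  apply List.ext_getElem
  · simp [PySem.List.length_pyRange_one]
  · intro i h1 h2
    simp only [List.getElem_map, List.getElem_reverse, PySem.List.getElem_pyRange_one]
    simp only [List.length_map, PySem.List.length_pyRange_one] at h1 h2 ⊢
    omega

theorem pv_mirror (a b : Int) :
    ((PySem.List.pyRange a b 1).countP pvCondA : Nat)
      = ((PySem.List.pyRange (1 - b) (1 - a) 1).countP pvCondA : Nat) := by
  conv_lhs => rw [← List.countP_reverse, ← pv_mirror_list a b]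
  rw [List.countP_map]
  apply List.countP_congr
  intro x hx
  simp only [Function.comp]
  rw [pv_condA_neg]

theorem pv_cntI_zero : pvCntI 0 = 0 := by
  unfold pvCntI pvCnt pvLuckyNat
  norm_num

theorem pv_luckyUpto_eq (n : Int) : pvLuckyUpto n = pvCntI n := by
  unfold pvLuckyUpto pvCountAvoid pvCntI
  by_cases hn : n < 0
  · simp [hn]
  · simp only [hn, if_false]
    rw [pv_CA_correct [7] (by decide) (by decide), pv_CA_correct [2,7] (by decide) (by decide)]
    have hsub := pv_countP_sub (pvAvoid [7]) (pvAvoid [2,7]) (List.range (n.toNat + 1)) ?_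
    · rw [← hsub]
      unfold pvCnt
      congr 1
      apply List.countP_congr
      intro x hx
      rw [pv_lucky_eq_avoid x]
    · intro x hx hq
      rw [pv_avoid_iff] at hq ⊢
      simp only [decide_eq_true_eq] at hq ⊢
      intro d hd
      have := hq d hd
      simp only [List.mem_cons, List.mem_singleton] at this ⊢
      tauto

theorem pv_A_countP (lo hi : Int) :
    numeros_sortudos lo hi = (((PySem.List.pyRange lo (hi + 1) 1).countP pvCondA : Nat) : Int) := by
  show (PySem.List.pyRange lo (hi + 1) 1).foldl (fun acc n => if pvCondA n then acc + 1 else acc) 0 = _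
  rw [PySem.List.foldl_if_add_one pvCondA]
  simp

theorem pv_main (lo hi : Int) : numeros_sortudos lo hi = numeros_sortudos_alt lo hi := by
  rw [pv_A_countP]
  unfold numeros_sortudos_alt
  simp only []
  by_cases hlt : hi < lo
  · rw [PySem.List.pyRange_one_eq_nil (by omega)]
    rw [if_neg (by omega), if_neg (by omega)]
    simp
  · push_neg at hlt
    by_cases hlo : 0 ≤ lo
    · -- fully nonnegative interval
      rw [pv_count_range_nonneg lo hi hlo (by omega)]
      rw [if_pos (by omega), if_neg (by omega)]
      rw [pv_luckyUpto_eq, pv_luckyUpto_eq]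
      have hmax : max lo 0 = lo := by omega
      rw [hmax]
      ring
    · push_neg at hlo
      by_cases hhi : hi < 0
      · -- fully negative interval: mirror to [-hi, -lo]
        rw [pv_mirror]
        have h1 : 1 - (hi + 1) = -hi := by ring
        have h2 : 1 - lo = (-lo) + 1 := by ring
        rw [h1, h2]
        rw [pv_count_range_nonneg (-hi) (-lo) (by omega) (by omega)]
        rw [if_neg (by omega), if_pos (by omega)]
        rw [pv_luckyUpto_eq, pv_luckyUpto_eq]
        have hmax : max (-hi) 1 = -hi := by omega
        rw [hmax]
        ring
      · push_neg at hhi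
        -- interval straddles zero: split at 0, mirror the negative half
        rw [PySem.List.pyRange_one_append lo 0 (hi + 1) (by omega) (by omega)]
        rw [List.countP_append]
        push_cast
        rw [pv_mirror lo 0]
        have h1 : 1 - (0:Int) = 1 := by ring
        have h2 : 1 - lo = (-lo) + 1 := by ring
        rw [h1, h2]
        rw [pv_count_range_nonneg 1 (-lo) (by omega) (by omega)]
        rw [pv_count_range_nonneg 0 hi (by omega) (by omega)]
        rw [if_pos (by omega), if_pos (by omega)]
        rw [pv_luckyUpto_eq, pv_luckyUpto_eq, pv_luckyUpto_eq, pv_luckyUpto_eq]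
        have h3 : max lo 0 = 0 := by omega
        have h4 : max (-hi) 1 = 1 := by omega
        rw [h3, h4]
        have h5 : pvCntI (1 - 1) = 0 := by norm_num [pv_cntI_zero]
        have h6 : pvCntI (0 - 1) = 0 := by unfold pvCntI; norm_num
        rw [h5, h6]
        ring

-- ===== VERDICT (by name: the statement is the Claim_ definition above) =====
theorem numeros_sortudos_spec : Claim_equal_numeros_sortudos := by
  intro lo hi _
  unfold Spec_numeros_sortudos
  exact pv_main lo hi
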